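-- pv_equiv track=rewrite | github.com/masterlyj/AI_Agent | src/Knowledge_Graph_Agent/utils.py | generate_reference_list_from_chunks
-- ===== SOURCE A (Python) =====
-- def generate_reference_list_from_chunks(
--     chunks: list[dict],
-- ) -> tuple[list[dict], list[dict]]:
--     """
--     Generate reference list from chunks, prioritizing by occurrence frequency.
--
--     This function extracts file_paths from chunks, counts their occurrences,
--     sorts by frequency and first appearance order, creates reference_id mappings,
--     and builds a reference_list structure.
--
--     Args:
--         chunks: List of chunk dictionaries with file_path information
--
--     Returns:
--         tuple: (reference_list, updated_chunks_with_reference_ids)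
--             - reference_list: List of dicts with reference_id and file_path
--             - updated_chunks_with_reference_ids: Original chunks with reference_id field added
--     """
--     if not chunks:
--         return [], []
--
--     # 1. Extract all valid file_paths and count their occurrences
--     file_path_counts = {}
--     for chunk in chunks:
--         file_path = chunk.get("file_path", "")
--         if file_path and file_path != "unknown_source":
--             file_path_counts[file_path] = file_path_counts.get(file_path, 0) + 1
--
--     # 2. Sort file paths by frequency (descending), then by first appearance order
--     # Create a list of (file_path, count, first_index) tuples
--     file_path_with_indices = []
--     seen_paths = set()
--     for i, chunk in enumerate(chunks):
--         file_path = chunk.get("file_path", "")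
--         if file_path and file_path != "unknown_source" and file_path not in seen_paths:
--             file_path_with_indices.append((file_path, file_path_counts[file_path], i))
--             seen_paths.add(file_path)
--
--     # Sort by count (descending), then by first appearance index (ascending)
--     sorted_file_paths = sorted(file_path_with_indices, key=lambda x: (-x[1], x[2]))
--     unique_file_paths = [item[0] for item in sorted_file_paths]
--
--     # 3. Create mapping from file_path to reference_id (prioritized by frequency)
--     file_path_to_ref_id = {}
--     for i, file_path in enumerate(unique_file_paths):
--         file_path_to_ref_id[file_path] = str(i + 1)
--
--     # 4. Add reference_id field to each chunk
--     updated_chunks = []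
--     for chunk in chunks:
--         chunk_copy = chunk.copy()
--         file_path = chunk_copy.get("file_path", "")
--         if file_path and file_path != "unknown_source":
--             chunk_copy["reference_id"] = file_path_to_ref_id[file_path]
--         else:
--             chunk_copy["reference_id"] = ""
--         updated_chunks.append(chunk_copy)
--
--     # 5. Build reference_list
--     reference_list = []
--     for i, file_path in enumerate(unique_file_paths):
--         reference_list.append({"reference_id": str(i + 1), "file_path": file_path})
--
--     return reference_list, updated_chunks
-- ===== SOURCE B (Python) =====
-- def generate_reference_list_from_chunks(
--     chunks: list[dict],
-- ) -> tuple[list[dict], list[dict]]: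
--     if not chunks:
--         return [], []
--
--     # Count valid file paths; dict insertion order records first appearance.
--     counts = {}
--     for chunk in chunks:
--         fp = chunk.get("file_path", "")
--         if fp and fp != "unknown_source":
--             counts[fp] = counts.get(fp, 0) + 1
--
--     # Counting (bucket) sort instead of a comparison sort: bucket c holds the
--     # paths occurring exactly c times, in first-appearance order; emitting the
--     # buckets from the highest count down yields the frequency ranking, and
--     # reference ids are assigned on the fly while emitting.
--     ref_id = {}
--     reference_list = []
--     if counts:
--         buckets = [[] for _ in range(max(counts.values()) + 1)]
--         for fp, c in counts.items():
--             buckets[c].append(fp)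
--         for bucket in reversed(buckets):
--             for fp in bucket:
--                 rid = str(len(reference_list) + 1)
--                 ref_id[fp] = rid
--                 reference_list.append({"reference_id": rid, "file_path": fp})
--
--     updated_chunks = [{**chunk, "reference_id": ref_id.get(chunk.get("file_path", ""), "")}
--                       for chunk in chunks]
--     return reference_list, updated_chunks
-- ===== Notes on version B (the rewrite author's own statement) =====
-- stated objective: alternative
-- what changed: B replaces A's comparison sort over (path,count,first_index) triples (and the seen_paths/first-index scan feeding it) by a counting sort: paths are dropped into buckets indexed by their occurrence count and the buckets are emitted from the highest count down, assigning reference ids on the fly; dict insertion order supplies the first-appearance tie-break, so no comparison sort and no index bookkeeping exist at all.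
import Mathlib
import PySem

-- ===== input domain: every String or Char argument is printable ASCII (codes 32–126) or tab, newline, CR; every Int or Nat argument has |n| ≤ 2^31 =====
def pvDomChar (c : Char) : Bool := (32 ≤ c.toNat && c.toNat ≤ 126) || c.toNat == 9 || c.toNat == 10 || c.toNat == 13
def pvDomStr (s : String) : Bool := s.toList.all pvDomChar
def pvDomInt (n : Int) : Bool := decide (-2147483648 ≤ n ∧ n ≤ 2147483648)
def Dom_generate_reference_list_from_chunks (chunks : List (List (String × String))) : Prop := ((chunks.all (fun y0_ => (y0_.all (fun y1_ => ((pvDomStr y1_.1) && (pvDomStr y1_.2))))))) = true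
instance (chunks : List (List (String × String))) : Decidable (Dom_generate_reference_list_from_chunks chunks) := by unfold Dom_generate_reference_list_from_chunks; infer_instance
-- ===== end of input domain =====

-- B replaces A's comparison sort of (path, count, first_index) triples by a counting
-- (bucket) sort over occurrence counts, assigning reference ids while emitting the
-- buckets from the highest count down (objective: alternative algorithm).

-- shared helpers: chunk.get("file_path", "") and the validity test `fp and fp != "unknown_source"`
def pvGetFP (chunk : List (String × String)) : String :=
  (PySem.Dict.ofList chunk).getD "file_path" ""

def pvValid (fp : String) : Bool :=
  (fp != "") && (fp != "unknown_source")

-- ===== PORT A =====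
-- A's loop 2 body (the seen_paths pass), extracted as a named step function
def pvSeenStep (c : PySem.Dict String Int)
    (acc : List (String × Int × Int) × PySem.Set String)
    (p : Int × List (String × String)) : List (String × Int × Int) × PySem.Set String :=
  if pvValid (pvGetFP p.2) && !(PySem.Set.contains acc.2 (pvGetFP p.2)) then
    (acc.1 ++ [(pvGetFP p.2, c.getD (pvGetFP p.2) 0, p.1)], PySem.Set.add acc.2 (pvGetFP p.2))
  else acc

def generate_reference_list_from_chunks (chunks : List (List (String × String))) :
    (List (List (String × String))) × (List (List (String × String))) :=
  if chunks = [] then ([], []) else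
  -- 1. count occurrences
  let file_path_counts : PySem.Dict String Int :=
    chunks.foldl (fun d chunk =>
      if pvValid (pvGetFP chunk) then d.insert (pvGetFP chunk) (d.getD (pvGetFP chunk) 0 + 1) else d)
      PySem.Dict.empty
  -- 2. (file_path, count, first_index) triples via seen_paths, then sort by (-count, index)
  let fpwi :=
    (PySem.List.enumerate chunks 0).foldl (pvSeenStep file_path_counts)
      (([] : List (String × Int × Int)), PySem.Set.empty)
  let sorted_file_paths :=
    PySem.List.sorted2 fpwi.1 (fun x => -x.2.1) (fun x => x.2.2)
  let unique_file_paths := sorted_file_paths.map (fun x => x.1)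
  -- 3. file_path -> reference_id
  let file_path_to_ref_id : PySem.Dict String String :=
    (PySem.List.enumerate unique_file_paths 0).foldl
      (fun d p => d.insert p.2 (PySem.Int.toStr (p.1 + 1))) PySem.Dict.empty
  -- 4. annotate chunks
  let updated_chunks :=
    chunks.foldl (fun acc chunk =>
      acc ++ [(if pvValid (pvGetFP chunk)
        then (PySem.Dict.ofList chunk).insert "reference_id" (file_path_to_ref_id.getD (pvGetFP chunk) "")
        else (PySem.Dict.ofList chunk).insert "reference_id" "").items]) []
  -- 5. reference list
  let reference_list :=
    (PySem.List.enumerate unique_file_paths 0).foldl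
      (fun acc p => acc ++ [[("reference_id", PySem.Int.toStr (p.1 + 1)), ("file_path", p.2)]]) []
  (reference_list, updated_chunks)

-- ===== PORT B =====
def generate_reference_list_from_chunks_alt (chunks : List (List (String × String))) :
    (List (List (String × String))) × (List (List (String × String))) :=
  if chunks = [] then ([], []) else
  let counts : PySem.Dict String Int :=
    chunks.foldl (fun d chunk =>
      if pvValid (pvGetFP chunk) then d.insert (pvGetFP chunk) (d.getD (pvGetFP chunk) 0 + 1) else d)
      PySem.Dict.empty
  -- `if counts:` guard; inside it, counting sort into buckets indexed by count.
  -- max(counts.values()) is total here via .getD 0 — under the guard the values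
  -- list is nonempty, so this is exactly Python's max.
  let st :=
    if counts.items = [] then ((PySem.Dict.empty : PySem.Dict String String), ([] : List (List (String × String)))) else
      let buckets0 : List (List String) :=
        List.replicate (((PySem.List.max? counts.values (fun v => v)).getD 0 + 1).toNat) []
      -- buckets[c].append(fp): get the bucket, append, store it back
      let buckets := counts.items.foldl
        (fun bs p => PySem.List.pySetD bs p.2 (PySem.List.pyGetD bs p.2 [] ++ [p.1])) buckets0
      -- for bucket in reversed(buckets): for fp in bucket: emit
      buckets.reverse.foldl (fun st bucket =>
        bucket.foldl (fun st fp =>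
          (st.1.insert fp (PySem.Int.toStr ((st.2.length : Int) + 1)),
           st.2 ++ [[("reference_id", PySem.Int.toStr ((st.2.length : Int) + 1)), ("file_path", fp)]])) st)
        ((PySem.Dict.empty : PySem.Dict String String), ([] : List (List (String × String))))
  (st.2, chunks.map (fun chunk =>
    ((PySem.Dict.ofList chunk).insert "reference_id" (st.1.getD (pvGetFP chunk) "")).items))

-- ===== PRECONDITION & SPEC =====
def Spec_generate_reference_list_from_chunks (chunks : List (List (String × String))) (out : (List (List (String × String))) × (List (List (String × String)))) : Prop := out = generate_reference_list_from_chunks_alt chunks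
instance (chunks : List (List (String × String))) (out : (List (List (String × String))) × (List (List (String × String)))) : Decidable (Spec_generate_reference_list_from_chunks chunks out) := by unfold Spec_generate_reference_list_from_chunks; infer_instance

-- ===== CLAIM (what is proved, stated in full; the proofs are below) =====
def Claim_equal_generate_reference_list_from_chunks : Prop := ∀ (chunks : List (List (String × String))), Dom_generate_reference_list_from_chunks chunks → Spec_generate_reference_list_from_chunks chunks (generate_reference_list_from_chunks chunks)

-- ===== LEMMAS AND PROOFS =====

-- a fold whose body first projects and filters equals a fold over the filtered projection
lemma pv_foldl_filter_map {α β γ : Type} (g : α → β) (P : β → Bool) (step : γ → β → γ) :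
    ∀ (l : List α) (init : γ),
      l.foldl (fun acc x => if P (g x) then step acc (g x) else acc) init
        = ((l.map g).filter P).foldl step init := by
  intro l
  induction l with
  | nil => intro init; rfl
  | cons x t ih =>
    intro init
    by_cases h : P (g x) = true
    · simp [h, ih]
    · simp [h, ih]

-- A's seen_paths loop: the first components are the first occurrences, in order
lemma pv_seenFst (c : PySem.Dict String Int) :
    ∀ (l : List (Int × List (String × String))) (acc : List (String × Int × Int))
      (seen : PySem.Set String), seen = acc.map (fun x => x.1) →
      ((l.foldl (pvSeenStep c) (acc, seen)).1).map (fun x => x.1)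
        = PySem.Set.update seen ((l.map (fun p => pvGetFP p.2)).filter pvValid) := by
  intro l
  induction l with
  | nil => intro acc seen h; simp [PySem.Set.update, h]
  | cons p t ih =>
    intro acc seen h
    by_cases hv : pvValid (pvGetFP p.2) = true
    · by_cases hcb : PySem.Set.contains seen (pvGetFP p.2) = true
      · have hm : pvGetFP p.2 ∈ seen := (PySem.Set.contains_iff _ _).mp hcb
        simp only [List.foldl_cons, pvSeenStep, hcb, Bool.not_true, Bool.and_false,
          Bool.false_eq_true, if_false, List.map_cons, List.filter_cons, hv, if_true]
        rw [PySem.Set.update_cons, PySem.Set.add_of_mem hm]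
        exact ih acc seen h
      · have hcb' : PySem.Set.contains seen (pvGetFP p.2) = false := by
          cases hx : PySem.Set.contains seen (pvGetFP p.2) with
          | false => rfl
          | true => exact absurd hx hcb
        have hm : pvGetFP p.2 ∉ seen := by simpa using hcb'
        simp only [List.foldl_cons, pvSeenStep, hcb', Bool.not_false, hv, Bool.and_true,
          if_true, List.map_cons, List.filter_cons]
        rw [PySem.Set.update_cons,
          ih (acc ++ [(pvGetFP p.2, c.getD (pvGetFP p.2) 0, p.1)]) _ (by
            rw [PySem.Set.add_of_not_mem hm, h]; simp)]
    · have hv' : pvValid (pvGetFP p.2) = false := by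
        cases hx : pvValid (pvGetFP p.2) with
        | false => rfl
        | true => exact absurd hx hv
      simp only [List.foldl_cons, pvSeenStep, hv', Bool.false_and, Bool.false_eq_true,
        if_false, List.map_cons, List.filter_cons]
      rw [ih acc seen h]

-- every triple the loop collects carries its path's count and its enumerate index
lemma pv_seenMem (c : PySem.Dict String Int) :
    ∀ (l : List (Int × List (String × String))) (acc : List (String × Int × Int))
      (seen : PySem.Set String) (x : String × Int × Int),
      x ∈ (l.foldl (pvSeenStep c) (acc, seen)).1 →
      x ∈ acc ∨ ∃ p, p ∈ l ∧ x = (pvGetFP p.2, c.getD (pvGetFP p.2) 0, p.1) := by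
  intro l
  induction l with
  | nil => intro acc seen x hx; exact Or.inl hx
  | cons p t ih =>
    intro acc seen x hx
    simp only [List.foldl_cons] at hx
    by_cases hcond : (pvValid (pvGetFP p.2) && !(PySem.Set.contains seen (pvGetFP p.2))) = true
    · simp only [pvSeenStep, hcond, if_true] at hx
      rcases ih _ _ x hx with hin | ⟨q, hq, hxq⟩
      · rcases List.mem_append.mp hin with h1 | h2
        · exact Or.inl h1
        · exact Or.inr ⟨p, List.mem_cons_self .., by simpa using h2⟩
      · exact Or.inr ⟨q, List.mem_cons_of_mem _ hq, hxq⟩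
    · have hcond' : (pvValid (pvGetFP p.2) && !(PySem.Set.contains seen (pvGetFP p.2))) = false := by
        cases hx2 : (pvValid (pvGetFP p.2) && !(PySem.Set.contains seen (pvGetFP p.2))) with
        | false => rfl
        | true => exact absurd hx2 hcond
      simp only [pvSeenStep, hcond', Bool.false_eq_true, if_false] at hx
      rcases ih _ _ x hx with hin | ⟨q, hq, hxq⟩
      · exact Or.inl hin
      · exact Or.inr ⟨q, List.mem_cons_of_mem _ hq, hxq⟩

-- the collected triples have strictly increasing first-appearance indices
lemma pv_seenPW (c : PySem.Dict String Int) :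
    ∀ (l : List (Int × List (String × String))) (acc : List (String × Int × Int))
      (seen : PySem.Set String),
      acc.Pairwise (fun a b => a.2.2 < b.2.2) →
      (∀ x ∈ acc, ∀ p ∈ l, x.2.2 < p.1) →
      l.Pairwise (fun p q => p.1 < q.1) →
      ((l.foldl (pvSeenStep c) (acc, seen)).1).Pairwise (fun a b => a.2.2 < b.2.2) := by
  intro l
  induction l with
  | nil => intro acc seen h1 _ _; exact h1
  | cons p t ih =>
    intro acc seen h1 h2 h3
    obtain ⟨hpl, hpt⟩ := List.pairwise_cons.mp h3
    simp only [List.foldl_cons]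
    by_cases hcond : (pvValid (pvGetFP p.2) && !(PySem.Set.contains seen (pvGetFP p.2))) = true
    · simp only [pvSeenStep, hcond, if_true]
      apply ih
      · refine List.pairwise_append.mpr ⟨h1, List.pairwise_singleton _ _, ?_⟩
        intro a ha b hb
        simp only [List.mem_singleton] at hb
        subst hb
        exact h2 a ha p (List.mem_cons_self ..)
      · intro x hx q hq
        rcases List.mem_append.mp hx with hxa | hxe
        · exact h2 x hxa q (List.mem_cons_of_mem _ hq)
        · simp only [List.mem_singleton] at hxe
          subst hxe
          exact hpl q hq
      · exact hpt
    · have hcond' : (pvValid (pvGetFP p.2) && !(PySem.Set.contains seen (pvGetFP p.2))) = false := by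
        cases hx2 : (pvValid (pvGetFP p.2) && !(PySem.Set.contains seen (pvGetFP p.2))) with
        | false => rfl
        | true => exact absurd hx2 hcond
      simp only [pvSeenStep, hcond', Bool.false_eq_true, if_false]
      exact ih acc seen h1 (fun x hx q hq => h2 x hx q (List.mem_cons_of_mem _ hq)) hpt

-- insertion position depends only on the comparisons against present elements
lemma pv_insertBy_congr {α : Type} (b1 b2 : α → α → Bool) (x : α) :
    ∀ ys : List α, (∀ y ∈ ys, b1 x y = b2 x y) →
      PySem.List.insertBy b1 x ys = PySem.List.insertBy b2 x ys := by
  intro ys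
  induction ys with
  | nil => intro _; rfl
  | cons y t ih =>
    intro h
    have hy := h y (List.mem_cons_self ..)
    simp only [PySem.List.insertBy, hy]
    by_cases hb : b2 x y = true
    · simp [hb]
    · simp [hb, ih (fun z hz => h z (List.mem_cons_of_mem _ hz))]

-- stable sort with a strictly increasing tie-break key = stable sort without it
lemma pv_foldl_insertBy_lex {α : Type} (k1 k2 : α → Int) :
    ∀ (xs acc : List α), xs.Pairwise (fun a b => k2 a < k2 b) →
      (∀ x ∈ xs, ∀ y ∈ acc, k2 y < k2 x) →
      xs.foldl (fun a x => PySem.List.insertBy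
        (fun a b => decide (k1 a < k1 b) || (!decide (k1 b < k1 a) && decide (k2 a < k2 b))) x a) acc
        = xs.foldl (fun a x => PySem.List.insertBy (fun a b => decide (k1 a < k1 b)) x a) acc := by
  intro xs
  induction xs with
  | nil => intro acc _ _; rfl
  | cons x t ih =>
    intro acc hpw hcross
    obtain ⟨hx, hpt⟩ := List.pairwise_cons.mp hpw
    simp only [List.foldl_cons]
    rw [pv_insertBy_congr
      (fun a b => decide (k1 a < k1 b) || (!decide (k1 b < k1 a) && decide (k2 a < k2 b)))
      (fun a b => decide (k1 a < k1 b)) x acc (fun y hy => by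
        have h1 : k2 y < k2 x := hcross x (List.mem_cons_self ..) y hy
        have h2 : decide (k2 x < k2 y) = false := by simp; omega
        simp [h2])]
    apply ih _ hpt
    intro z hz y hy
    rcases (PySem.List.mem_insertBy _ _ _ _).mp hy with h | h
    · subst h; exact hx z hz
    · exact hcross z (List.mem_cons_of_mem _ hz) y h

lemma pv_sorted2_eq_sorted {α : Type} (k1 k2 : α → Int) (xs : List α)
    (h : xs.Pairwise (fun a b => k2 a < k2 b)) :
    PySem.List.sorted2 xs k1 k2 = PySem.List.sorted xs k1 := by
  have h1 : PySem.List.sorted2 xs k1 k2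
      = xs.foldl (fun a x => PySem.List.insertBy
          (fun a b => decide (k1 a < k1 b) || (!decide (k1 b < k1 a) && decide (k2 a < k2 b))) x a) [] := rfl
  have h2 : PySem.List.sorted xs k1
      = xs.foldl (fun a x => PySem.List.insertBy (fun a b => decide (k1 a < k1 b)) x a) [] := rfl
  rw [h1, h2, pv_foldl_insertBy_lex k1 k2 xs [] h (by simp)]

lemma pv_insertBy_map {α β : Type} (f : α → β) (bk : α → α → Bool) (bg : β → β → Bool) (x : α) :
    ∀ ys : List α, (∀ y ∈ ys, bk x y = bg (f x) (f y)) →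
      (PySem.List.insertBy bk x ys).map f = PySem.List.insertBy bg (f x) (ys.map f) := by
  intro ys
  induction ys with
  | nil => intro _; rfl
  | cons y t ih =>
    intro h
    have hy := h y (List.mem_cons_self ..)
    simp only [List.map_cons, PySem.List.insertBy, hy]
    by_cases hb : bg (f x) (f y) = true
    · simp [hb]
    · simp [hb, ih (fun z hz => h z (List.mem_cons_of_mem _ hz))]

-- projecting a stable sort = stable sort of the projection, when keys agree through the projection
lemma pv_foldl_insertBy_map {α β : Type} (f : α → β) (k : α → Int) (g : β → Int) :
    ∀ (xs acc : List α), (∀ x ∈ xs, k x = g (f x)) → (∀ y ∈ acc, k y = g (f y)) →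
      (xs.foldl (fun a x => PySem.List.insertBy (fun a b => decide (k a < k b)) x a) acc).map f
        = (xs.map f).foldl (fun a y => PySem.List.insertBy (fun a b => decide (g a < g b)) y a) (acc.map f) := by
  intro xs
  induction xs with
  | nil => intro acc _ _; rfl
  | cons x t ih =>
    intro acc hxs hacc
    have hx := hxs x (List.mem_cons_self ..)
    simp only [List.foldl_cons, List.map_cons]
    rw [← pv_insertBy_map f (fun a b => decide (k a < k b)) (fun a b => decide (g a < g b)) x acc
      (fun y hy => by simp only [hx, hacc y hy])]
    apply ih _ (fun z hz => hxs z (List.mem_cons_of_mem _ hz))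
    intro y hy
    rcases (PySem.List.mem_insertBy _ _ _ _).mp hy with h | h
    · subst h; exact hx
    · exact hacc y h

lemma pv_sorted_map {α β : Type} (f : α → β) (k : α → Int) (g : β → Int) (xs : List α)
    (h : ∀ x ∈ xs, k x = g (f x)) :
    (PySem.List.sorted xs k).map f = PySem.List.sorted (xs.map f) g := by
  rw [PySem.List.sorted_eq_foldl_insertBy, PySem.List.sorted_eq_foldl_insertBy]
  exact pv_foldl_insertBy_map f k g xs [] h (by simp)

-- ===== B-side lemmas: counting sort = stable sort by descending count =====

-- skip a prefix the new element does not go before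
lemma pv_insertBy_append {α : Type} (bf : α → α → Bool) (x : α) :
    ∀ (l r : List α), (∀ y ∈ l, bf x y = false) →
      PySem.List.insertBy bf x (l ++ r) = l ++ PySem.List.insertBy bf x r := by
  intro l
  induction l with
  | nil => intro r _; rfl
  | cons y t ih =>
    intro r h
    have hy := h y (List.mem_cons_self ..)
    simp [PySem.List.insertBy, hy, ih r (fun z hz => h z (List.mem_cons_of_mem _ hz))]

-- the new element goes in front of a list it precedes entirely
lemma pv_insertBy_front {α : Type} (bf : α → α → Bool) (x : α) :
    ∀ r : List α, (∀ y ∈ r, bf x y = true) → PySem.List.insertBy bf x r = x :: r := by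
  intro r
  cases r with
  | nil => intro _; rfl
  | cons y t => intro h; simp [PySem.List.insertBy, h y (List.mem_cons_self ..)]

-- inserting into a bucket decomposition appends to the element's own bucket
lemma pv_insertBy_flatMap {α : Type} (key : α → Int) (g : Int → List α) (x : α) :
    ∀ ks : List Int, ks.Pairwise (· < ·) → key x ∈ ks →
      (∀ k ∈ ks, ∀ y ∈ g k, key y = k) →
      PySem.List.insertBy (fun a b => decide (key a < key b)) x (ks.flatMap g)
        = ks.flatMap (fun k => g k ++ if key x = k then [x] else []) := by
  intro ks
  induction ks with
  | nil => intro _ hx _; cases hx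
  | cons k t ih =>
    intro hpw hx hg
    obtain ⟨hkt, hpt⟩ := List.pairwise_cons.mp hpw
    simp only [List.flatMap_cons]
    by_cases hxk : key x = k
    · rw [pv_insertBy_append _ x (g k) _ (fun y hy => by
        have hk := hg k (List.mem_cons_self ..) y hy
        simp [hk, hxk])]
      rw [pv_insertBy_front _ x _ (fun y hy => by
        obtain ⟨k', hk', hy'⟩ := List.mem_flatMap.mp hy
        have h1 := hg k' (List.mem_cons_of_mem _ hk') y hy'
        have h2 := hkt k' hk'
        simp only [h1, hxk, decide_eq_true_eq]
        exact h2)]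
      rw [if_pos hxk]
      have ht : t.flatMap (fun k' => g k' ++ if key x = k' then [x] else []) = t.flatMap g := by
        apply List.flatMap_congr
        intro k' hk'
        have : key x ≠ k' := by have := hkt k' hk'; omega
        simp [this]
      rw [ht]
      simp
    · have hxt : key x ∈ t := by
        rcases List.mem_cons.mp hx with h | h
        · exact absurd h hxk
        · exact h
      have hxgt : k < key x := hkt _ hxt
      rw [pv_insertBy_append _ x (g k) _ (fun y hy => by
        have hk := hg k (List.mem_cons_self ..) y hy
        simp only [hk, decide_eq_false_iff_not]
        omega)]
      rw [ih hpt hxt (fun k' hk' y hy => hg k' (List.mem_cons_of_mem _ hk') y hy)]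
      rw [if_neg hxk]
      simp

-- a stable sort whose keys all lie in a strictly increasing list ks is the
-- concatenation, over ks, of the key-k elements in original order
lemma pv_sorted_eq_flatMap {α : Type} (key : α → Int) (ks : List Int)
    (hks : ks.Pairwise (· < ·)) :
    ∀ xs : List α, (∀ x ∈ xs, key x ∈ ks) →
      PySem.List.sorted xs key = ks.flatMap (fun k => xs.filter (fun x => decide (key x = k))) := by
  intro xs
  induction xs using List.reverseRecOn with
  | nil =>
    intro _
    have h : ks.flatMap (fun k => ([] : List α).filter (fun x => decide (key x = k))) = [] := by
      rw [List.flatMap_eq_nil_iff]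
      intro k _
      rfl
    rw [h]
    rfl
  | append_singleton xs x ih =>
    intro hmem
    rw [PySem.List.sorted_eq_foldl_insertBy, List.foldl_append, List.foldl_cons, List.foldl_nil,
      ← PySem.List.sorted_eq_foldl_insertBy,
      ih (fun y hy => hmem y (List.mem_append_left _ hy)),
      pv_insertBy_flatMap key (fun k => xs.filter (fun x => decide (key x = k))) x ks hks
        (hmem x (by simp))
        (fun k _ y hy => by simpa using (List.mem_filter.mp hy).2)]
    apply List.flatMap_congr
    intro k _
    by_cases hxk : key x = k
    · simp [List.filter_append, hxk]
    · simp [List.filter_append, hxk]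

-- the bucket fold keeps the number of buckets
lemma pv_bucketFold_length :
    ∀ (l : List (String × Int)) (bs : List (List String)),
      (l.foldl (fun bs p => PySem.List.pySetD bs p.2 (PySem.List.pyGetD bs p.2 [] ++ [p.1])) bs).length
        = bs.length := by
  intro l
  induction l with
  | nil => intro bs; rfl
  | cons p t ih => intro bs; rw [List.foldl_cons, ih, PySem.List.length_pySetD]

-- after the bucket fold, bucket c holds (in order) the first components of the
-- pairs whose second component is c
lemma pv_bucketFold_getD :
    ∀ (l : List (String × Int)) (bs : List (List String)),
      (∀ p ∈ l, 0 ≤ p.2 ∧ p.2 < (bs.length : Int)) → ∀ c : Nat, c < bs.length →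
      (l.foldl (fun bs p => PySem.List.pySetD bs p.2 (PySem.List.pyGetD bs p.2 [] ++ [p.1])) bs).getD c []
        = bs.getD c [] ++ (l.filter (fun p => decide (p.2 = (c : Int)))).map (·.1) := by
  intro l
  induction l with
  | nil => intro bs _ c _; simp
  | cons p t ih =>
    intro bs hb c hc
    obtain ⟨h0, hlt⟩ := hb p (List.mem_cons_self ..)
    have hip : p.2 = (p.2.toNat : Int) := (Int.toNat_of_nonneg h0).symm
    have hil : p.2.toNat < bs.length := by omega
    rw [List.foldl_cons, hip, PySem.List.pySetD_natCast, PySem.List.pyGetD_natCast,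
      ih _ (fun q hq => by
        have := hb q (List.mem_cons_of_mem _ hq)
        rwa [List.length_set]) c (by rwa [List.length_set])]
    by_cases hci : p.2.toNat = c
    · have hset : (bs.set p.2.toNat (bs.getD p.2.toNat [] ++ [p.1])).getD c [] = bs.getD c [] ++ [p.1] := by
        rw [← hci]
        simp [List.getD_eq_getElem?_getD, hil]
      have hfp : (decide (p.2 = (c : Int))) = true := by rw [hip]; simp [hci]
      rw [hset, List.filter_cons, hfp]
      simp
    · have hset : (bs.set p.2.toNat (bs.getD p.2.toNat [] ++ [p.1])).getD c [] = bs.getD c [] := by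
        simp [List.getD_eq_getElem?_getD, List.getElem?_set_ne hci]
      have hfp : (decide (p.2 = (c : Int))) = false := by
        rw [hip]
        simp only [decide_eq_false_iff_not, Int.natCast_inj]
        exact hci
      rw [hset, List.filter_cons, hfp]
      simp

-- flattening the reversed bucket array = concatenating buckets by descending index
lemma pv_reverse_flatten {α : Type} :
    ∀ bs : List (List α),
      bs.reverse.flatten = ((List.range bs.length).reverse).flatMap (fun c => bs.getD c []) := by
  intro bs
  induction bs using List.reverseRecOn with
  | nil => rfl
  | append_singleton bs b ih =>
    rw [List.reverse_append, List.length_append, List.length_singleton, List.range_succ,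
      List.reverse_append]
    simp only [List.reverse_singleton, List.singleton_append, List.flatten_cons,
      List.flatMap_cons]
    have h1 : (bs ++ [b]).getD bs.length [] = b := by
      simp [List.getD_eq_getElem?_getD, List.getElem?_append_right]
    have h2 : (List.range bs.length).reverse.flatMap (fun c => (bs ++ [b]).getD c [])
        = (List.range bs.length).reverse.flatMap (fun c => bs.getD c []) := by
      apply List.flatMap_congr
      intro c hcm
      have hc : c < bs.length := List.mem_range.mp (List.mem_reverse.mp hcm)
      simp [List.getD_eq_getElem?_getD, List.getElem?_append_left hc]
    rw [h1, h2, ih]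

-- the emission loop: builds the ref-id dict and the reference list in step
lemma pv_emit :
    ∀ (l : List String) (st : PySem.Dict String String × List (List (String × String))),
      l.foldl (fun st fp =>
          (st.1.insert fp (PySem.Int.toStr ((st.2.length : Int) + 1)),
           st.2 ++ [[("reference_id", PySem.Int.toStr ((st.2.length : Int) + 1)), ("file_path", fp)]])) st
        = ((PySem.List.enumerate l (st.2.length : Int)).foldl
             (fun d p => d.insert p.2 (PySem.Int.toStr (p.1 + 1))) st.1,
           st.2 ++ (PySem.List.enumerate l (st.2.length : Int)).map
             (fun p => [("reference_id", PySem.Int.toStr (p.1 + 1)), ("file_path", p.2)])) := by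
  intro l
  induction l with
  | nil => intro st; simp [PySem.List.enumerate_nil]
  | cons fp t ih =>
    intro st
    rw [List.foldl_cons, PySem.List.enumerate_cons, List.foldl_cons, List.map_cons, ih]
    have hlen : (((st.2 ++ [[("reference_id", PySem.Int.toStr ((st.2.length : Int) + 1)), ("file_path", fp)]]).length : Int))
        = (st.2.length : Int) + 1 := by
      simp
    rw [hlen]
    simp

lemma pv_main (chunks : List (List (String × String))) :
    generate_reference_list_from_chunks chunks = generate_reference_list_from_chunks_alt chunks := by
  by_cases hnil : chunks = []
  · subst hnil; rfl
  · simp only [generate_reference_list_from_chunks, generate_reference_list_from_chunks_alt,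
      if_neg hnil]
    set c : PySem.Dict String Int :=
      chunks.foldl (fun d chunk =>
        if pvValid (pvGetFP chunk) then d.insert (pvGetFP chunk) (d.getD (pvGetFP chunk) 0 + 1) else d)
        PySem.Dict.empty with hc
    set v : List String := (chunks.map pvGetFP).filter pvValid with hv
    have hcfold : c = ((chunks.map pvGetFP).filter pvValid).foldl
        (fun d fp => d.insert fp (d.getD fp 0 + 1)) PySem.Dict.empty :=
      hc.trans (pv_foldl_filter_map pvGetFP pvValid
        (fun (d : PySem.Dict String Int) fp => d.insert fp (d.getD fp 0 + 1)) chunks PySem.Dict.empty)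
    have hkeys : c.keys = PySem.Set.ofList v := by
      rw [hcfold, PySem.Dict.keys_foldl_insert, PySem.Dict.keys_empty, ← hv]
      rfl
    have hnodupk : c.keys.Nodup := by
      rw [hkeys]; exact PySem.Set.nodup_ofList v
    have hcnt : ∀ fp, c.getD fp 0 = (v.count fp : Int) := by
      intro fp
      rw [hcfold, ← hv, PySem.Dict.getD_foldl_insert_add_one, PySem.Dict.getD_empty]
      simp
    -- A-side reduction to U = sorted c.keys (-count)
    set w := (PySem.List.enumerate chunks 0).foldl (pvSeenStep c)
      (([] : List (String × Int × Int)), PySem.Set.empty) with hw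
    have henum : (PySem.List.enumerate chunks 0).map (fun p => pvGetFP p.2) = chunks.map pvGetFP := by
      conv_rhs => rw [← PySem.List.map_snd_enumerate chunks 0, List.map_map]
      rfl
    have hwfst : w.1.map (fun x => x.1) = PySem.Set.ofList v := by
      rw [hw, pv_seenFst c (PySem.List.enumerate chunks 0) [] PySem.Set.empty rfl, henum, ← hv,
        PySem.Set.update_empty]
    have hwmem : ∀ x ∈ w.1, (fun x : String × Int × Int => -x.2.1) x
        = (fun p => -(c.getD p 0)) ((fun x : String × Int × Int => x.1) x) := by
      intro x hx
      rcases pv_seenMem c (PySem.List.enumerate chunks 0) [] PySem.Set.empty x (hw ▸ hx) with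
        h | ⟨p, _, rfl⟩
      · cases h
      · rfl
    have hwpw : w.1.Pairwise (fun a b => a.2.2 < b.2.2) := by
      rw [hw]
      exact pv_seenPW c _ [] _ (by simp) (by simp) (PySem.List.pairwise_lt_enumerate ..)
    have horder : (PySem.List.sorted2 w.1 (fun x => -x.2.1) (fun x => x.2.2)).map (fun x => x.1)
        = PySem.List.sorted c.keys (fun p => -(c.getD p 0)) := by
      rw [pv_sorted2_eq_sorted _ _ _ hwpw,
        pv_sorted_map (fun x => x.1) (fun x => -x.2.1) (fun p => -(c.getD p 0)) w.1 hwmem,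
        hwfst, ← hkeys]
    rw [horder]
    set U := PySem.List.sorted c.keys (fun p => -(c.getD p 0)) with hU
    set D : PySem.Dict String String :=
      (PySem.List.enumerate U 0).foldl (fun d p => d.insert p.2 (PySem.Int.toStr (p.1 + 1)))
        PySem.Dict.empty with hD
    -- B's state equals (D, the canonical reference list)
    have hstate :
        (if c.items = [] then ((PySem.Dict.empty : PySem.Dict String String), ([] : List (List (String × String)))) else
          let buckets0 : List (List String) :=
            List.replicate (((PySem.List.max? c.values (fun v => v)).getD 0 + 1).toNat) []
          let buckets := c.items.foldl
            (fun bs p => PySem.List.pySetD bs p.2 (PySem.List.pyGetD bs p.2 [] ++ [p.1])) buckets0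
          buckets.reverse.foldl (fun st bucket =>
            bucket.foldl (fun st fp =>
              (st.1.insert fp (PySem.Int.toStr ((st.2.length : Int) + 1)),
               st.2 ++ [[("reference_id", PySem.Int.toStr ((st.2.length : Int) + 1)), ("file_path", fp)]])) st)
            ((PySem.Dict.empty : PySem.Dict String String), ([] : List (List (String × String)))))
        = (D, (PySem.List.enumerate U 0).map
            (fun p => [("reference_id", PySem.Int.toStr (p.1 + 1)), ("file_path", p.2)])) := by
      by_cases hemp : c.items = []
      · have hk0 : c.keys = [] := by simp [PySem.Dict.keys, hemp]
        have hU0 : U = [] := by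
          rw [hU, hk0]; rfl
        rw [if_pos hemp, hU0, hD, hU0]
        rfl
      · rw [if_neg hemp]
        -- max over the (nonempty) values
        have hvals : c.values ≠ [] := by
          intro h
          apply hemp
          have : c.items.map (·.2) = [] := h
          exact List.map_eq_nil_iff.mp this
        obtain ⟨mc, hmc⟩ : ∃ mc, PySem.List.max? c.values (fun v => v) = some mc := by
          cases hx : PySem.List.max? c.values (fun v => v) with
          | none => exact absurd ((PySem.List.max?_eq_none_iff _ _).mp hx) hvals
          | some m => exact ⟨m, rfl⟩
        have hmax : ∀ y ∈ c.values, y ≤ mc := PySem.List.max?_isMax hmc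
        have hval_cnt : ∀ p ∈ c.items, p.2 = c.getD p.1 0 := by
          intro p hp
          exact (PySem.Dict.getD_of_mem_items c (by exact hp) hnodupk 0).symm
        have hbound : ∀ p ∈ c.items, 0 ≤ p.2 ∧ p.2 ≤ mc := by
          intro p hp
          constructor
          · rw [hval_cnt p hp, hcnt]; positivity
          · exact hmax p.2 (List.mem_map.mpr ⟨p, hp, rfl⟩)
        have hmc0 : 0 ≤ mc := by
          obtain ⟨p, hp⟩ := List.exists_mem_of_ne_nil c.items hemp
          have := hbound p hp
          omega
        set m : Nat := (mc + 1).toNat with hm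
        have hmInt : (m : Int) = mc + 1 := by omega
        have hgd : (PySem.List.max? c.values (fun v => v)).getD 0 = mc := by rw [hmc]; rfl
        rw [hgd]
        set bs0 : List (List String) := List.replicate m [] with hbs0
        have hbs0len : bs0.length = m := by simp [hbs0]
        set B := c.items.foldl
          (fun bs p => PySem.List.pySetD bs p.2 (PySem.List.pyGetD bs p.2 [] ++ [p.1])) bs0 with hB
        have hBlen : B.length = m := by rw [hB, pv_bucketFold_length, hbs0len]
        have hbnd : ∀ p ∈ c.items, 0 ≤ p.2 ∧ p.2 < (bs0.length : Int) := by
          intro p hp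
          have := hbound p hp
          rw [hbs0len, hmInt]
          omega
        have hBgetD : ∀ cc : Nat, cc < m →
            B.getD cc [] = (c.items.filter (fun p => decide (p.2 = (cc : Int)))).map (·.1) := by
          intro cc hcc
          rw [hB, pv_bucketFold_getD c.items bs0 hbnd cc (by omega)]
          have : bs0.getD cc [] = [] := by
            simp [hbs0, List.getD_eq_getElem?_getD, List.getElem?_replicate, hcc]
          rw [this, List.nil_append]
        -- the emitted order is exactly U
        have hFU : B.reverse.flatten = U := by
          rw [pv_reverse_flatten B, hBlen]
          have hUflat : U = ((List.range m).reverse).flatMap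
              (fun (cc : Nat) => c.keys.filter (fun fp => decide (c.getD fp 0 = (cc : Int)))) := by
            have hks : (((List.range m).reverse).map (fun (cc : Nat) => -(cc : Int))).Pairwise (· < ·) := by
              rw [List.pairwise_map, List.pairwise_reverse]
              refine (List.pairwise_lt_range (n := m)).imp ?_
              intro a b hab
              omega
            have hmemks : ∀ fp ∈ c.keys,
                (fun p => -(c.getD p 0)) fp ∈ ((List.range m).reverse).map (fun (cc : Nat) => -(cc : Int)) := by
              intro fp hfp
              have h1 : (fp, c.getD fp 0) ∈ c.items := by
                have := PySem.Dict.items_eq_map_keys c hnodupk 0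
                rw [this]
                exact List.mem_map.mpr ⟨fp, hfp, rfl⟩
              have h2 := hbound _ h1
              simp only [List.mem_map, List.mem_reverse, List.mem_range]
              refine ⟨(c.getD fp 0).toNat, by omega, by omega⟩
            rw [hU, pv_sorted_eq_flatMap (fun p => -(c.getD p 0)) _ hks c.keys hmemks,
              List.flatMap_map]
            apply List.flatMap_congr
            intro cc _
            apply List.filter_congr
            intro fp _
            simp only [decide_eq_decide]
            omega
          rw [hUflat]
          apply List.flatMap_congr
          intro cc hcc
          have hccm : cc < m := List.mem_range.mp (List.mem_reverse.mp hcc)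
          rw [hBgetD cc hccm]
          have hitems := PySem.Dict.items_eq_map_keys c hnodupk 0
          rw [hitems, List.filter_map, List.map_map]
          have : ((fun x : String × Int => x.1) ∘ fun k => (k, c.getD k 0)) = id := rfl
          rw [this, List.map_id]
          apply List.filter_congr
          intro fp _
          simp [Function.comp]
        rw [List.foldl_flatten.symm, hFU, pv_emit U (PySem.Dict.empty, [])]
        simp [hD]
    rw [hstate]
    simp only [Prod.mk.injEq]
    constructor
    · rw [PySem.List.foldl_append_singleton_eq_map
        (fun p : Int × String => [("reference_id", PySem.Int.toStr (p.1 + 1)), ("file_path", p.2)])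
        (PySem.List.enumerate U 0) []]
      simp
    · rw [PySem.List.foldl_append_singleton_eq_map
        (fun chunk => (if pvValid (pvGetFP chunk)
          then (PySem.Dict.ofList chunk).insert "reference_id" (D.getD (pvGetFP chunk) "")
          else (PySem.Dict.ofList chunk).insert "reference_id" "").items) chunks []]
      simp only [List.nil_append]
      apply List.map_congr_left
      intro chunk _
      by_cases hvfp : pvValid (pvGetFP chunk) = true
      · rw [if_pos hvfp]
      · rw [if_neg hvfp]
        have hnc : D.contains (pvGetFP chunk) = false := by
          rw [PySem.Dict.contains_eq_decide_mem_keys D]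
          simp only [decide_eq_false_iff_not]
          intro hmem
          have hDkeys : D.keys = PySem.Set.ofList U := by
            rw [hD, PySem.Dict.keys_foldl_insert_key (PySem.List.enumerate U 0) (fun p => p.2)
              (fun d p => PySem.Int.toStr (p.1 + 1)) PySem.Dict.empty, PySem.Dict.keys_empty,
              PySem.List.map_snd_enumerate]
            rfl
          rw [hDkeys] at hmem
          have h1 : pvGetFP chunk ∈ U := (PySem.Set.mem_ofList _ _).mp hmem
          have h2 : pvGetFP chunk ∈ c.keys := (PySem.List.mem_sorted _ _ _ _).mp h1
          rw [hkeys] at h2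
          have h3 : pvGetFP chunk ∈ v := (PySem.Set.mem_ofList _ _).mp h2
          rw [hv] at h3
          exact hvfp (List.of_mem_filter h3)
        rw [PySem.Dict.getD_of_not_contains D "" hnc]

-- ===== VERDICT (by name: the statement is the Claim_ definition above) =====
theorem generate_reference_list_from_chunks_spec : Claim_equal_generate_reference_list_from_chunks := by
  intro chunks _
  unfold Spec_generate_reference_list_from_chunks
  exact pv_main chunks
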